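-- pv_equiv track=rewrite | github.com/wipro-daniel/App-Auto | autoApp/scripts/utils/formatExcel.py | createJsonFromSheet2
-- ===== SOURCE A (Python) =====
-- def createJsonFromSheet2(headers,sheets):
--     jsonStorage = []
--     currentApplication = ""
--
--     appDict = {}
--     applicationStorage = []
--     counter = 0
--
--     for row in sheets:
--         # If the rows are in a new application type
--         if currentApplication != row[0]:
--             # Set the dictionary entry to the application dictionary
--             if counter !=0:
--                 appDict[currentApplication] = applicationStorage
--                 applicationStorage = []
--             # If its the first row - set a application
--             currentApplication = row[0]
--         newDict = {}
--         for header in range(len(headers)):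
--             newDict[headers[header]] = row[header]
--         applicationStorage.append(newDict)
--         counter +=1
--     # Then there is only one instance of values
--     if sheets != []:
--         appDict[currentApplication] = applicationStorage
--
--     #print (appDict)
--     jsonStorage.append(appDict)
--
--     return jsonStorage
-- ===== SOURCE B (Python) =====
-- def createJsonFromSheet2(headers, sheets):
--     # Two-pointer scan over consecutive runs sharing the same first column;
--     # each run is assigned in one go (a later run with a seen key overwrites).
--     appDict = {}
--     n = len(sheets)
--     i = 0
--     while i < n:
--         key = sheets[i][0]
--         j = i + 1
--         while j < n and sheets[j][0] == key:
--             j += 1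
--         appDict[key] = [{headers[k]: row[k] for k in range(len(headers))}
--                         for row in sheets[i:j]]
--         i = j
--     return [appDict]
-- ===== Notes on version B (the rewrite author's own statement) =====
-- stated objective: simpler
-- what changed: Replaces A's row-by-row state machine (currentApplication/applicationStorage/counter with an end-of-loop flush) by a two-pointer scan that finds each consecutive run of rows sharing the same first column and assigns the whole run's list of row dicts at once.
-- outside the precondition, e.g. on createJsonFromSheet2(['a'], [[]]): A raises IndexError, B raises IndexError; on createJsonFromSheet2(['a', 'b'], [['x']]): A raises IndexError, B raises IndexError
import Mathlib
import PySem

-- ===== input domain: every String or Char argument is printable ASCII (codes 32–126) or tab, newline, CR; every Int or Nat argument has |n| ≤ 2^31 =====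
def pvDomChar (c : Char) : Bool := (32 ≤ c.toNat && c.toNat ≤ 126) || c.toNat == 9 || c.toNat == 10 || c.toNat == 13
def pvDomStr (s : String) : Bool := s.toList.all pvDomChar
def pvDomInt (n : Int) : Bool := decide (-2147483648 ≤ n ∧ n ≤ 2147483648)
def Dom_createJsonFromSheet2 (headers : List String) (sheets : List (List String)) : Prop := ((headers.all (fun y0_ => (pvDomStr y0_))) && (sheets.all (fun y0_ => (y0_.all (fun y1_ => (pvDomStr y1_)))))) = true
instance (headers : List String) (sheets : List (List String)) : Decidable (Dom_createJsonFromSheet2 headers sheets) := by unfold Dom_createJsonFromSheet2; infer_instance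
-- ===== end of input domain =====

-- B replaces A's row-by-row state machine (currentApplication/applicationStorage/counter)
-- with a two-pointer scan over consecutive runs of equal first-column keys; objective: simpler.


-- ===== PORT A =====
-- newDict = {}; for header in range(len(headers)): newDict[headers[header]] = row[header]
-- (inside Pre_ every index is in range, so getD's default is never used)
def pvRowDictA (headers row : List String) : List (String × String) :=
  ((List.range headers.length).foldl
    (fun d h => d.insert (headers.getD h "") (row.getD h ""))
    (PySem.Dict.empty : PySem.Dict String String)).items

-- one iteration of A's 'for row in sheets' loop over the state
-- (appDict, currentApplication, applicationStorage, counter)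
def pvStepA (headers : List String)
    (st : PySem.Dict String (List (List (String × String))) × String × List (List (String × String)) × Int)
    (row : List String) :
    PySem.Dict String (List (List (String × String))) × String × List (List (String × String)) × Int :=
  let (appDict, currentApplication, applicationStorage, counter) := st
  let (appDict, currentApplication, applicationStorage) :=
    if currentApplication ≠ row.getD 0 "" then
      if counter ≠ 0 then
        ((appDict.insert currentApplication applicationStorage), row.getD 0 "", ([] : List (List (String × String))))
      else
        (appDict, row.getD 0 "", applicationStorage)
    else
      (appDict, currentApplication, applicationStorage)
  (appDict, currentApplication, applicationStorage ++ [pvRowDictA headers row], counter + 1)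

def createJsonFromSheet2 (headers : List String) (sheets : List (List String)) : List (List (String × List (List (String × String)))) :=
  let st := sheets.foldl (pvStepA headers) (PySem.Dict.empty, "", [], 0)
  let appDict := if sheets ≠ [] then st.1.insert st.2.1 st.2.2.1 else st.1
  [appDict.items]

-- ===== PORT B =====
-- {headers[k]: row[k] for k in range(len(headers))}
def pvRowDictB (headers row : List String) : List (String × String) :=
  (PySem.Dict.ofList ((List.range headers.length).map (fun k => (headers.getD k "", row.getD k "")))).items

-- B's outer while loop: take the run of rows whose first column equals the
-- current row's, assign the whole run at once, continue after the run.
def pvLoopB (headers : List String) :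
    List (List String) → PySem.Dict String (List (List (String × String))) →
    PySem.Dict String (List (List (String × String)))
  | [], appDict => appDict
  | row :: rest, appDict =>
      let key := row.getD 0 ""
      let run := rest.takeWhile (fun r => r.getD 0 "" == key)
      pvLoopB headers (rest.dropWhile (fun r => r.getD 0 "" == key))
        (appDict.insert key ((row :: run).map (pvRowDictB headers)))
  termination_by l => l.length
  decreasing_by
    exact Nat.lt_succ_of_le (List.length_dropWhile_le _ _)

def createJsonFromSheet2_alt (headers : List String) (sheets : List (List String)) : List (List (String × List (List (String × String)))) :=
  [(pvLoopB headers sheets PySem.Dict.empty).items]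

-- ===== PRECONDITION & SPEC =====
-- Pre_ excludes exactly the inputs where Python A raises IndexError:
-- an empty row (row[0]) or a row shorter than headers (row[header]).
def Pre_createJsonFromSheet2 (headers : List String) (sheets : List (List String)) : Prop :=
  ∀ row ∈ sheets, row ≠ [] ∧ headers.length ≤ row.length

instance (headers : List String) (sheets : List (List String)) : Decidable (Pre_createJsonFromSheet2 headers sheets) := by unfold Pre_createJsonFromSheet2; infer_instance

def pvWitness_createJsonFromSheet2 : List String × List (List String) :=
  (["app", "val"], [["x", "1"], ["x", "2"], ["y", "3"]])

def Spec_createJsonFromSheet2 (headers : List String) (sheets : List (List String)) (out : List (List (String × List (List (String × String))))) : Prop := out = createJsonFromSheet2_alt headers sheets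
instance (headers : List String) (sheets : List (List String)) (out : List (List (String × List (List (String × String))))) : Decidable (Spec_createJsonFromSheet2 headers sheets out) := by unfold Spec_createJsonFromSheet2; infer_instance

-- ===== CLAIM (what is proved, stated in full; the proofs are below) =====
def Claim_equal_createJsonFromSheet2 : Prop := ∀ (headers : List String) (sheets : List (List String)), Dom_createJsonFromSheet2 headers sheets → Pre_createJsonFromSheet2 headers sheets → Spec_createJsonFromSheet2 headers sheets (createJsonFromSheet2 headers sheets)

-- ===== LEMMAS AND PROOFS =====

-- A's remaining fold followed by the final flush
def pvFinish (st : PySem.Dict String (List (List (String × String))) × String × List (List (String × String)) × Int) :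
    PySem.Dict String (List (List (String × String))) :=
  st.1.insert st.2.1 st.2.2.1

-- the two row-dict builders agree
theorem pvRowDict_eq (headers row : List String) : pvRowDictA headers row = pvRowDictB headers row := by
  simp [pvRowDictA, pvRowDictB, PySem.Dict.ofList, PySem.Dict.update, List.foldl_map]

-- main invariant: once at least one row has been consumed (counter > 0), A's
-- remaining fold plus the final flush equals B's run loop with the pending run
-- flushed into the accumulator.
theorem pvLoop_inv (headers : List String) :
    ∀ (n : Nat) (rest : List (List String)), rest.length ≤ n →
    ∀ (d : PySem.Dict String (List (List (String × String)))) (cur : String)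
      (stor : List (List (String × String))) (counter : Int), 0 < counter →
    pvFinish (rest.foldl (pvStepA headers) (d, cur, stor, counter)) =
    pvLoopB headers (rest.dropWhile (fun r => r.getD 0 "" == cur))
      (d.insert cur (stor ++ (rest.takeWhile (fun r => r.getD 0 "" == cur)).map (pvRowDictA headers))) := by
  intro n
  induction n with
  | zero =>
      intro rest hlen d cur stor counter hc
      have h : rest = [] := List.eq_nil_of_length_eq_zero (Nat.le_zero.mp hlen)
      subst h
      simp [pvFinish, pvLoopB]
  | succ n ih =>
      intro rest hlen d cur stor counter hc
      match rest with
      | [] => simp [pvFinish, pvLoopB]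
      | row :: rest' =>
          have hlen' : rest'.length ≤ n := by simpa using Nat.lt_succ_iff.mp (Nat.lt_of_lt_of_le (by simp) hlen)
          by_cases hk : row[0]?.getD "" = cur
          · have hstep : pvStepA headers (d, cur, stor, counter) row
                = (d, cur, stor ++ [pvRowDictA headers row], counter + 1) := by
              simp [pvStepA, List.getD, hk]
            rw [List.foldl_cons, hstep, ih rest' hlen' d cur (stor ++ [pvRowDictA headers row]) (counter + 1) (by omega)]
            simp [List.getD, hk]
          · have hne : cur ≠ row[0]?.getD "" := fun h => hk h.symm
            have hstep : pvStepA headers (d, cur, stor, counter) row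
                = (d.insert cur stor, row.getD 0 "", [pvRowDictA headers row], counter + 1) := by
              have hc0 : ¬ counter = 0 := by omega
              simp [pvStepA, List.getD, if_neg hne, hc0]
            rw [List.foldl_cons, hstep,
              ih rest' hlen' (d.insert cur stor) (row.getD 0 "") [pvRowDictA headers row] (counter + 1) (by omega)]
            simp [List.getD, hk, pvLoopB, pvRowDict_eq]
            rw [show pvRowDictA headers = pvRowDictB headers from funext (pvRowDict_eq headers)]

-- ===== VERDICT (by name: the statement is the Claim_ definition above) =====
theorem createJsonFromSheet2_spec : Claim_equal_createJsonFromSheet2 := by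
  intro headers sheets _ _
  unfold Spec_createJsonFromSheet2 createJsonFromSheet2 createJsonFromSheet2_alt
  match sheets with
  | [] => simp [pvLoopB]
  | row :: rest =>
      have hstep : pvStepA headers (PySem.Dict.empty, "", [], 0) row
          = (PySem.Dict.empty, row.getD 0 "", [pvRowDictA headers row], 1) := by
        by_cases h0 : row[0]?.getD "" = ""
        · simp [pvStepA, List.getD, h0]
        · simp [pvStepA, List.getD, h0]
      have hmain := pvLoop_inv headers rest.length rest le_rfl PySem.Dict.empty (row.getD 0 "")
        [pvRowDictA headers row] 1 (by omega)
      simp only [List.foldl_cons, hstep]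
      rw [show (rest.foldl (pvStepA headers) (PySem.Dict.empty, row.getD 0 "", [pvRowDictA headers row], 1)).1.insert
            (rest.foldl (pvStepA headers) (PySem.Dict.empty, row.getD 0 "", [pvRowDictA headers row], 1)).2.1
            (rest.foldl (pvStepA headers) (PySem.Dict.empty, row.getD 0 "", [pvRowDictA headers row], 1)).2.2.1
          = pvFinish (rest.foldl (pvStepA headers) (PySem.Dict.empty, row.getD 0 "", [pvRowDictA headers row], 1)) from rfl,
        hmain]
      simp [pvLoopB, pvRowDict_eq]
      rw [show pvRowDictA headers = pvRowDictB headers from funext (pvRowDict_eq headers)]
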